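-- pv_equiv track=rewrite | github.com/lericson/da | da/csvstats.py | shell_compress
-- ===== SOURCE A (Python) =====
-- from typing import Generator, Iterable
--
-- def shell_compress(strs: Iterable[str]) -> str:
--
--     str0, *rest = strs
--     str_list = [str0, *rest]
--
--     if not rest:
--         return str0
--
--     rts0, *_ = rts_list = [s[::-1] for s in str_list]
--
--     n = min(map(len, str_list))
--
--     prefix_len = next((i for i in range(n)              if any(str0[i] != s[i] for s in str_list)), n)
--     suffix_len = next((i for i in range(n - prefix_len) if any(rts0[i] != r[i] for r in rts_list)), 0)
--
--     prefix = str0[:prefix_len]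
--     suffix = rts0[:suffix_len][::-1]
--
--     diffs = [s[prefix_len:len(s) - suffix_len or None] for s in str_list]
--
--     return f"{prefix}{{{','.join(diffs)}}}{suffix}"
-- ===== SOURCE B (Python) =====
-- def shell_compress(strs):
--     str_list = list(strs)
--     str0 = str_list[0]
--     if len(str_list) == 1:
--         return str0
--
--     def cpl(a, b):
--         i = 0
--         while i < len(a) and i < len(b) and a[i] == b[i]:
--             i += 1
--         return i
--
--     p = len(str0)
--     cs = len(str0)
--     for s in str_list[1:]:
--         p = min(p, cpl(str0, s))
--         cs = min(cs, cpl(str0[::-1], s[::-1]))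
--     n = min(len(s) for s in str_list)
--     suf = min(cs, n - p)
--     diffs = [s[p:len(s) - suf] for s in str_list]
--     return f"{str0[:p]}{{{','.join(diffs)}}}{str0[::-1][:suf][::-1]}"
-- ===== Notes on version B (the rewrite author's own statement) =====
-- stated objective: idiomatic
-- what changed: Replaces A's position-major generator scans (next over range with an inner any across all strings) by a single string-major fold maintaining pairwise common-prefix/common-suffix lengths against the first string, and caps the suffix with min(cs, n - p) instead of a scan with a 0 default.
-- intended difference: On multi-string inputs whose full common suffix covers the whole remainder after the common prefix (0 < n - prefix_len <= common suffix), A's next(..., 0) default yields suffix_len 0 and returns the uncompressed form (e.g. '{ab,cab}'), while B moves the maximal suffix out ('{,c}ab'); B's value is the intended compression and expands to the same strings. — e.g. on shell_compress(["ab", "cab"]): A returns "{ab,cab}", B returns "{,c}ab"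
import Mathlib
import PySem

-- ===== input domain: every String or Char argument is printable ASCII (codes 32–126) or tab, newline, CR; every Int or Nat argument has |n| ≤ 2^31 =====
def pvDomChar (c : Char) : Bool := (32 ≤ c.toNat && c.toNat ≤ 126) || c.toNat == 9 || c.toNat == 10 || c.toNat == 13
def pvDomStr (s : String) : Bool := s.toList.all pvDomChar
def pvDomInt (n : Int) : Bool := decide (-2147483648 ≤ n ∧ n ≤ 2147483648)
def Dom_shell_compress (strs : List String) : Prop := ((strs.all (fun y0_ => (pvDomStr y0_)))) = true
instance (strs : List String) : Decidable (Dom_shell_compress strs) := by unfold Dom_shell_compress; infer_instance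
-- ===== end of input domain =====

-- B replaces A's position-major scans (next over range with an inner any across all strings) by a
-- string-major fold of pairwise common-prefix/suffix lengths, and caps the suffix by min instead of
-- a scan defaulting to 0 (intended difference, see D_ below).  Objective: idiomatic.

-- ===== PORT A =====
-- Python slices here use only non-negative, in-range bounds: s[a:b] = (drop a).take (b-a),
-- s[a:] = drop a, s[:b] = take b, s[::-1] = reverse — exact on that domain (PySem.List.slice_natCast).
-- Indices i drawn from range(n) satisfy i < length of every string inspected, so getElem? is exact.
def shell_compress (strs : List String) : String :=
  match strs with
  | [] => ""  -- 'str0, *rest = strs' raises ValueError on an empty iterable; excluded by Pre_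
  | str0 :: rest =>
    if rest = [] then str0   -- 'if not rest: return str0'
    else
      let c0 := str0.toList
      let str_list := (str0 :: rest).map String.toList
      let rts_list := str_list.map List.reverse           -- [s[::-1] for s in str_list]
      let rts0 := c0.reverse
      -- n = min(map(len, str_list)) : Python's min of a non-empty list = fold of min from its head
      let n := (rest.map (fun s => s.toList.length)).foldl min c0.length
      -- next((i for i in range(n) if any(str0[i] != s[i] for s in str_list)), n)
      let prefix_len := ((List.range n).find?
        (fun i => str_list.any (fun s => !(c0[i]? == s[i]?)))).getD n
      -- next((i for i in range(n - prefix_len) if any(rts0[i] != r[i] for r in rts_list)), 0)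
      let suffix_len := ((List.range (n - prefix_len)).find?
        (fun i => rts_list.any (fun r => !(rts0[i]? == r[i]?)))).getD 0
      let pfx := c0.take prefix_len                    -- str0[:prefix_len]
      let sfx := (rts0.take suffix_len).reverse        -- rts0[:suffix_len][::-1]
      -- [s[prefix_len:len(s) - suffix_len or None] for s in str_list]
      let diffs := str_list.map (fun s =>
        if s.length - suffix_len = 0 then s.drop prefix_len
        else (s.drop prefix_len).take (s.length - suffix_len - prefix_len))
      String.ofList (pfx ++ '{' :: (List.intercalate [','] diffs ++ '}' :: sfx))

-- ===== PORT B =====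
-- cpl(a, b) of Source B: length of the common prefix of a and b (the while loop, step for step)
def cplChars : List Char → List Char → Nat
  | a :: as, b :: bs => if a = b then cplChars as bs + 1 else 0
  | _, _ => 0

def shell_compress_alt (strs : List String) : String :=
  match strs with
  | [] => ""  -- str_list[0] raises IndexError on an empty iterable; excluded by Pre_
  | str0 :: rest =>
    if rest = [] then str0   -- 'if len(str_list) == 1: return str0'
    else
      let c0 := str0.toList
      -- the single for loop maintaining p and cs
      let pcs := rest.foldl
        (fun (pc : Nat × Nat) s =>
          (min pc.1 (cplChars c0 s.toList), min pc.2 (cplChars c0.reverse s.toList.reverse)))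
        (c0.length, c0.length)
      let n := rest.foldl (fun m s => min m s.toList.length) c0.length  -- min(len(s) for s in str_list)
      let suf := min pcs.2 (n - pcs.1)
      -- [s[p:len(s) - suf] for s in str_list]  (0 ≤ p, 0 ≤ len(s)-suf: exact as drop/take)
      let diffs := (str0 :: rest).map (fun s =>
        (s.toList.drop pcs.1).take (s.toList.length - suf - pcs.1))
      String.ofList (c0.take pcs.1 ++ '{' ::
        (List.intercalate [','] diffs ++ '}' :: (c0.reverse.take suf).reverse))

-- ===== PRECONDITION & SPEC =====
-- Pre_ excludes only the empty list, on which A raises ValueError (and B IndexError).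
def Pre_shell_compress (strs : List String) : Prop := strs ≠ []
instance (strs : List String) : Decidable (Pre_shell_compress strs) := by
  unfold Pre_shell_compress; infer_instance
def pvWitness_shell_compress : List String := ["a", "b"]

-- D_-side helpers: closed-form functions of the input only (no port code is reached by D_);
-- pvCpl is the common-prefix length stated via zip/takeWhile, pvF the least value of f on strs
def pvCpl (a b : List Char) : Nat := ((a.zip b).takeWhile (fun p => p.1 == p.2)).length
def pvF (f : String → Nat) (strs : List String) : Nat := (strs.map f).min?.getD 0

-- On multi-string inputs whose full common suffix covers the whole remainder after the common prefix
-- (0 < n - prefix_len ≤ common-suffix length), A's next(..., 0) default yields suffix_len 0 and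
-- returns the uncompressed form ('{ab,cab}'), while B moves the maximal suffix out ('{,c}ab');
-- B's value is the intended compression and expands to the same strings.
def D_shell_compress (strs : List String) : Prop :=
  2 ≤ strs.length ∧
  let h := (strs.headD "").toList
  let p := pvF (fun s => pvCpl h s.toList) strs
  let n := pvF String.length strs
  0 < n - p ∧ n - p ≤ pvF (fun s => pvCpl h.reverse s.toList.reverse) strs
instance (strs : List String) : Decidable (D_shell_compress strs) := by
  unfold D_shell_compress; infer_instance

def Spec_shell_compress (strs : List String) (out : String) : Prop :=
  ¬ D_shell_compress strs → out = shell_compress_alt strs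
instance (strs : List String) (out : String) : Decidable (Spec_shell_compress strs out) := by
  unfold Spec_shell_compress; infer_instance

def pvDiffWitness_shell_compress : List String := ["ab", "cab"]
def pvDiffWitnessOut_shell_compress : String × String := ("{ab,cab}", "{,c}ab")

-- ===== CLAIM (what is proved, stated in full; the proofs are below) =====
def Claim_unchanged_shell_compress : Prop :=
  ∀ (strs : List String), Dom_shell_compress strs → Pre_shell_compress strs →
    Spec_shell_compress strs (shell_compress strs)
def Claim_changed_shell_compress : Prop :=
  Dom_shell_compress (pvDiffWitness_shell_compress) ∧
  Pre_shell_compress (pvDiffWitness_shell_compress) ∧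
  D_shell_compress (pvDiffWitness_shell_compress) ∧
  shell_compress (pvDiffWitness_shell_compress) = pvDiffWitnessOut_shell_compress.1 ∧
  shell_compress_alt (pvDiffWitness_shell_compress) = pvDiffWitnessOut_shell_compress.2 ∧
  pvDiffWitnessOut_shell_compress.1 ≠ pvDiffWitnessOut_shell_compress.2
def Claim_exact_shell_compress : Prop :=
  ∀ (strs : List String), Dom_shell_compress strs → Pre_shell_compress strs →
    D_shell_compress strs → shell_compress strs ≠ shell_compress_alt strs

-- ===== LEMMAS AND PROOFS =====

-- a foldl of a min-update splits in pairs
theorem foldl_pair_min {α : Type} (f g : α → Nat) (l : List α) (a b : Nat) :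
    l.foldl (fun (pc : Nat × Nat) s => (min pc.1 (f s), min pc.2 (g s))) (a, b)
      = (l.foldl (fun m s => min m (f s)) a, l.foldl (fun m s => min m (g s)) b) := by
  induction l generalizing a b with
  | nil => rfl
  | cons x xs ih => simpa using ih (min a (f x)) (min b (g x))

theorem foldl_min_le_init {α : Type} (f : α → Nat) (l : List α) (a : Nat) :
    l.foldl (fun m s => min m (f s)) a ≤ a := by
  induction l generalizing a with
  | nil => simp
  | cons x xs ih => exact le_trans (ih _) (Nat.min_le_left _ _)

theorem foldl_min_le_mem {α : Type} (f : α → Nat) {x : α} :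
    ∀ (l : List α) (a : Nat), x ∈ l → l.foldl (fun m s => min m (f s)) a ≤ f x
  | y :: ys, a, hx => by
      simp only [List.foldl_cons]
      rcases List.mem_cons.mp hx with h | h
      · subst h; exact le_trans (foldl_min_le_init f ys _) (Nat.min_le_right _ _)
      · exact foldl_min_le_mem f ys _ h

theorem le_foldl_min {α : Type} (f : α → Nat) (l : List α) (a b : Nat)
    (ha : b ≤ a) (hl : ∀ x ∈ l, b ≤ f x) :
    b ≤ l.foldl (fun m s => min m (f s)) a := by
  induction l generalizing a with
  | nil => simpa using ha
  | cons x xs ih =>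
    exact ih _ (le_min ha (hl x (by simp))) (fun y hy => hl y (by simp [hy]))

theorem foldl_min_attained {α : Type} (f : α → Nat) (l : List α) (a : Nat) :
    l.foldl (fun m s => min m (f s)) a = a ∨
      ∃ x ∈ l, l.foldl (fun m s => min m (f s)) a = f x := by
  induction l generalizing a with
  | nil => simp
  | cons x xs ih =>
    rcases ih (min a (f x)) with h | ⟨y, hy, h⟩
    · by_cases hax : a ≤ f x
      · exact Or.inl (by simpa [Nat.min_eq_left hax] using h)
      · exact Or.inr ⟨x, by simp, h.trans (Nat.min_eq_right (by omega))⟩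
    · exact Or.inr ⟨y, by simp [hy], by simpa using h⟩

theorem pvF_cons (f : String → Nat) (x : String) (l : List String) :
    pvF f (x :: l) = l.foldl (fun m s => min m (f s)) (f x) := by
  rw [pvF, List.map_cons, List.min?_cons', Option.getD_some, List.foldl_map]

theorem cplChars_self (a : List Char) : cplChars a a = a.length := by
  induction a with
  | nil => rfl
  | cons x xs ih => simp [cplChars, ih]

theorem pvCpl_eq (a b : List Char) : pvCpl a b = cplChars a b := by
  induction a generalizing b with
  | nil => cases b <;> simp [pvCpl, cplChars]
  | cons x xs ih =>
    cases b with
    | nil => simp [pvCpl, cplChars]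
    | cons y ys =>
      by_cases h : x = y
      · simpa [pvCpl, cplChars, List.takeWhile, h] using ih ys
      · simp [pvCpl, cplChars, h]

theorem cpl_le_right (a b : List Char) : cplChars a b ≤ b.length := by
  induction a generalizing b with
  | nil => cases b <;> simp [cplChars]
  | cons x xs ih =>
    cases b with
    | nil => simp [cplChars]
    | cons y ys => by_cases h : x = y <;> simp [cplChars, h] <;> exact ih ys

theorem cpl_get?_eq (a b : List Char) {i : Nat} (hi : i < cplChars a b) :
    a[i]? = b[i]? := by
  induction a generalizing b i with
  | nil => simp [cplChars] at hi
  | cons x xs ih =>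
    cases b with
    | nil => simp [cplChars] at hi
    | cons y ys =>
      by_cases h : x = y
      · cases i with
        | zero => simp [h]
        | succ j => simpa using ih ys (by simpa [cplChars, h] using hi)
      · simp [cplChars, h] at hi

theorem cpl_mismatch (a b : List Char) (h1 : cplChars a b < a.length)
    (h2 : cplChars a b < b.length) : ¬ a[cplChars a b]? = b[cplChars a b]? := by
  induction a generalizing b with
  | nil => simp at h1
  | cons x xs ih =>
    cases b with
    | nil => simp at h2
    | cons y ys =>
      by_cases h : x = y
      · have := ih ys (by simpa [cplChars, h] using h1) (by simpa [cplChars, h] using h2)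
        simpa [cplChars, h] using this
      · simpa [cplChars, h] using h

theorem range_find?_eq_some (p : Nat → Bool) (n m : Nat) (hm : m < n)
    (hp : p m = true) (hlt : ∀ k < m, p k = false) :
    (List.range n).find? p = some m := by
  rw [List.range_eq_range', List.find?_range'_eq_some]
  exact ⟨hp, by simp [List.mem_range'_1, hm], fun j _ hj => by simp [hlt j hj]⟩

-- the central scan lemma: A's generator scan over range m computes the fold-of-min of cplChars
theorem scan_core (c0 : List Char) (ss : List (List Char)) (m : Nat)
    (hm0 : m ≤ c0.length) (hms : ∀ s ∈ ss, m ≤ s.length) :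
    (List.range m).find? (fun i => (c0 :: ss).any (fun s => !(c0[i]? == s[i]?)))
      = (if (ss.foldl (fun acc s => min acc (cplChars c0 s)) c0.length) < m
         then some (ss.foldl (fun acc s => min acc (cplChars c0 s)) c0.length) else none) := by
  have hMle : ∀ s ∈ ss, ss.foldl (fun acc s => min acc (cplChars c0 s)) c0.length ≤ cplChars c0 s :=
    fun s hs => foldl_min_le_mem _ _ _ hs
  set M := ss.foldl (fun acc s => min acc (cplChars c0 s)) c0.length with hM
  have hfalse : ∀ k < M, ((c0 :: ss).any (fun s => !(c0[k]? == s[k]?))) = false := by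
    intro k hk
    simp only [List.any_eq_false, Bool.not_eq_true', beq_eq_false_iff_ne, ne_eq, not_not]
    intro s hs
    rcases List.mem_cons.mp hs with rfl | hs
    · rfl
    · exact cpl_get?_eq c0 s (lt_of_lt_of_le hk (hMle s hs))
  split_ifs with h
  · refine range_find?_eq_some _ _ _ h ?_ hfalse
    rcases foldl_min_attained (fun s => cplChars c0 s) ss c0.length with he | ⟨s, hs, he⟩
    · rw [← hM] at he; omega
    · rw [← hM] at he
      have hlen := hms s hs
      have hne := cpl_mismatch c0 s (by omega) (by omega)
      simp only [List.any_eq_true]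
      refine ⟨s, List.mem_cons_of_mem _ hs, ?_⟩
      rw [he]
      simpa using hne
  · rw [List.find?_eq_none]
    intro x hx
    have hxm : x < m := List.mem_range.mp hx
    simp [hfalse x (by omega)]

theorem length_intercalate_comma : ∀ (l : List (List Char)),
    (List.intercalate [','] l).length = (l.map List.length).sum + l.length - 1 := by
  intro l
  induction l with
  | nil => simp [List.intercalate]
  | cons a t ih =>
    cases t with
    | nil => simp [List.intercalate]
    | cons b t2 =>
      simp [List.intercalate] at ih ⊢
      omega

theorem sum_shift {α : Type} (l : List α) (f g : α → Nat) (c : Nat)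
    (h : ∀ s ∈ l, f s = g s + c) :
    (l.map f).sum = (l.map g).sum + l.length * c := by
  induction l with
  | nil => simp
  | cons x xs ih =>
    simp only [List.map_cons, List.sum_cons, List.length_cons, h x (by simp)]
    rw [ih (fun s hs => h s (by simp [hs]))]
    ring

theorem main_eq (str0 : String) (rest : List String) (hr : rest ≠ [])
    (hnd : ¬ D_shell_compress (str0 :: rest)) :
    shell_compress (str0 :: rest) = shell_compress_alt (str0 :: rest) := by
  have h2 : 2 ≤ (str0 :: rest).length := by cases rest with
    | nil => exact absurd rfl hr
    | cons a l => simp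
  set c0 := str0.toList with hc0
  have hPdef : pvF (fun s => pvCpl c0 s.toList) (str0 :: rest) =
      rest.foldl (fun m s => min m (cplChars c0 s.toList)) c0.length := by
    simp only [pvF_cons, pvCpl_eq, hc0, cplChars_self]
  have hCSdef : pvF (fun s => pvCpl c0.reverse s.toList.reverse) (str0 :: rest) =
      rest.foldl (fun m s => min m (cplChars c0.reverse s.toList.reverse)) c0.length := by
    simp only [pvF_cons, pvCpl_eq, hc0, cplChars_self, List.length_reverse]
  have hndef : pvF String.length (str0 :: rest) =
      rest.foldl (fun m s => min m s.toList.length) c0.length := by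
    simp only [pvF_cons, hc0, String.length_toList]
  set P := rest.foldl (fun m s => min m (cplChars c0 s.toList)) c0.length with hP
  set CS := rest.foldl (fun m s => min m (cplChars c0.reverse s.toList.reverse)) c0.length with hCS
  set n := rest.foldl (fun m s => min m s.toList.length) c0.length with hn
  simp only [D_shell_compress, List.headD_cons, ← hc0, hPdef, hCSdef, hndef] at hnd
  have hnd2 : ¬ (0 < n - P ∧ n - P ≤ CS) := fun hc => hnd ⟨h2, hc.1, hc.2⟩
  -- basic bounds
  have hn0 : n ≤ c0.length := foldl_min_le_init _ _ _
  have hns : ∀ s ∈ rest, n ≤ s.toList.length := fun s hs => foldl_min_le_mem _ _ _ hs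
  have hPc0 : P ≤ c0.length := foldl_min_le_init _ _ _
  have hPn : P ≤ n := le_foldl_min _ _ _ _ hPc0
    (fun s hs => le_trans (foldl_min_le_mem _ _ _ hs) (cpl_le_right _ _))
  -- the prefix scan equals P
  have hpre : (((List.range n).find?
      (fun i => ((str0 :: rest).map String.toList).any (fun s => !(c0[i]? == s[i]?)))).getD n) = P := by
    have hscan := scan_core c0 (rest.map String.toList) n hn0
      (by intro s hs; rcases List.mem_map.mp hs with ⟨t, ht, rfl⟩; exact hns t ht)
    have hfold : (rest.map String.toList).foldl
        (fun acc s => min acc (cplChars c0 s)) c0.length = P := by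
      rw [List.foldl_map]
    rw [List.map_cons, ← hc0, hscan]
    split_ifs with h <;> simp only [Option.getD_some, Option.getD_none] <;> omega
  -- the suffix scan equals min CS (n - P)
  have hsuf : (((List.range (n - P)).find?
      (fun i => (((str0 :: rest).map String.toList).map List.reverse).any
        (fun r => !(c0.reverse[i]? == r[i]?)))).getD 0) = min CS (n - P) := by
    have hscan := scan_core c0.reverse ((rest.map String.toList).map List.reverse) (n - P)
      (by simp; omega)
      (by intro s hs
          simp only [List.mem_map] at hs
          rcases hs with ⟨t, ⟨u, hu, rfl⟩, rfl⟩
          simpa using le_trans (Nat.sub_le _ _) (hns u hu))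
    have hfold : ((rest.map String.toList).map List.reverse).foldl
        (fun acc s => min acc (cplChars c0.reverse s)) c0.reverse.length = CS := by
      rw [List.foldl_map, List.foldl_map, List.length_reverse]
    simp only [List.map_cons, ← hc0]
    rw [hscan, hfold]
    split_ifs with h <;> simp only [Option.getD_some, Option.getD_none] <;> omega
  -- now unfold both ports and rewrite
  simp only [shell_compress, shell_compress_alt]
  rw [if_neg hr, if_neg hr]
  rw [← hc0]
  have hnfold : (rest.map (fun s => s.toList.length)).foldl min c0.length = n := by
    rw [List.foldl_map]
  rw [hnfold, hpre, hsuf]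
  rw [foldl_pair_min (fun s => cplChars c0 s.toList)
        (fun s => cplChars c0.reverse s.toList.reverse) rest c0.length c0.length]
  have hPfold : rest.foldl (fun m s => min m (cplChars c0 s.toList)) c0.length = P := hP.symm
  have hCSfold : rest.foldl (fun m s => min m (cplChars c0.reverse s.toList.reverse)) c0.length = CS :=
    hCS.symm
  have hnfold2 : rest.foldl (fun m s => min m s.toList.length) c0.length = n := hn.symm
  simp only [hPfold, hCSfold, hnfold2]
  -- the diff slices agree elementwise on the strings of the input
  have hdiffs : ∀ s ∈ str0 :: rest,
      (if s.toList.length - min CS (n - P) = 0 then List.drop P s.toList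
       else List.take (s.toList.length - min CS (n - P) - P) (List.drop P s.toList))
        = List.take (s.toList.length - min CS (n - P) - P) (List.drop P s.toList) := by
    intro s hs
    have hsn : n ≤ s.toList.length := by
      rcases List.mem_cons.mp hs with rfl | hs
      · exact hn0
      · exact hns s hs
    split_ifs with h
    · have hlen : s.toList.length = 0 := by omega
      rw [List.eq_nil_of_length_eq_zero hlen]
      simp
    · rfl
  simp only [List.map_map, Function.comp_def]
  rw [List.map_congr_left hdiffs]

theorem main_neq (str0 : String) (rest : List String) (hr : rest ≠ [])
    (hd : D_shell_compress (str0 :: rest)) :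
    shell_compress (str0 :: rest) ≠ shell_compress_alt (str0 :: rest) := by
  set c0 := str0.toList with hc0
  have hPdef : pvF (fun s => pvCpl c0 s.toList) (str0 :: rest) =
      rest.foldl (fun m s => min m (cplChars c0 s.toList)) c0.length := by
    simp only [pvF_cons, pvCpl_eq, hc0, cplChars_self]
  have hCSdef : pvF (fun s => pvCpl c0.reverse s.toList.reverse) (str0 :: rest) =
      rest.foldl (fun m s => min m (cplChars c0.reverse s.toList.reverse)) c0.length := by
    simp only [pvF_cons, pvCpl_eq, hc0, cplChars_self, List.length_reverse]
  have hndef : pvF String.length (str0 :: rest) =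
      rest.foldl (fun m s => min m s.toList.length) c0.length := by
    simp only [pvF_cons, hc0, String.length_toList]
  set P := rest.foldl (fun m s => min m (cplChars c0 s.toList)) c0.length with hP
  set CS := rest.foldl (fun m s => min m (cplChars c0.reverse s.toList.reverse)) c0.length with hCS
  set n := rest.foldl (fun m s => min m s.toList.length) c0.length with hn
  simp only [D_shell_compress, List.headD_cons, ← hc0, hPdef, hCSdef, hndef] at hd
  obtain ⟨-, hd2, hd3⟩ := hd
  have hn0 : n ≤ c0.length := foldl_min_le_init _ _ _
  have hns : ∀ s ∈ rest, n ≤ s.toList.length := fun s hs => foldl_min_le_mem _ _ _ hs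
  have hPc0 : P ≤ c0.length := foldl_min_le_init _ _ _
  have hPn : P ≤ n := le_foldl_min _ _ _ _ hPc0
    (fun s hs => le_trans (foldl_min_le_mem _ _ _ hs) (cpl_le_right _ _))
  have hpre : (((List.range n).find?
      (fun i => ((str0 :: rest).map String.toList).any (fun s => !(c0[i]? == s[i]?)))).getD n) = P := by
    have hscan := scan_core c0 (rest.map String.toList) n hn0
      (by intro s hs; rcases List.mem_map.mp hs with ⟨t, ht, rfl⟩; exact hns t ht)
    have hfold : (rest.map String.toList).foldl
        (fun acc s => min acc (cplChars c0 s)) c0.length = P := by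
      rw [List.foldl_map]
    rw [List.map_cons, ← hc0, hscan]
    split_ifs with h <;> simp only [Option.getD_some, Option.getD_none] <;> omega
  -- inside D_ the suffix scan finds no mismatch and defaults to 0
  have hsuf0 : (((List.range (n - P)).find?
      (fun i => (((str0 :: rest).map String.toList).map List.reverse).any
        (fun r => !(c0.reverse[i]? == r[i]?)))).getD 0) = 0 := by
    have hscan := scan_core c0.reverse ((rest.map String.toList).map List.reverse) (n - P)
      (by simp; omega)
      (by intro s hs
          simp only [List.mem_map] at hs
          rcases hs with ⟨t, ⟨u, hu, rfl⟩, rfl⟩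
          simpa using le_trans (Nat.sub_le _ _) (hns u hu))
    have hfold : ((rest.map String.toList).map List.reverse).foldl
        (fun acc s => min acc (cplChars c0.reverse s)) c0.reverse.length = CS := by
      rw [List.foldl_map, List.foldl_map, List.length_reverse]
    simp only [List.map_cons, ← hc0]
    rw [hscan, hfold, if_neg (by omega)]
    rfl
  simp only [shell_compress, shell_compress_alt]
  rw [if_neg hr, if_neg hr]
  rw [← hc0]
  have hnfold : (rest.map (fun s => s.toList.length)).foldl min c0.length = n := by
    rw [List.foldl_map]
  rw [hnfold, hpre, hsuf0]
  rw [foldl_pair_min (fun s => cplChars c0 s.toList)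
        (fun s => cplChars c0.reverse s.toList.reverse) rest c0.length c0.length]
  have hPfold : rest.foldl (fun m s => min m (cplChars c0 s.toList)) c0.length = P := hP.symm
  have hCSfold : rest.foldl (fun m s => min m (cplChars c0.reverse s.toList.reverse)) c0.length = CS :=
    hCS.symm
  have hnfold2 : rest.foldl (fun m s => min m s.toList.length) c0.length = n := hn.symm
  simp only [hPfold, hCSfold, hnfold2]
  have hdiffsA : ∀ s ∈ str0 :: rest,
      (if s.toList.length - 0 = 0 then List.drop P s.toList
       else List.take (s.toList.length - 0 - P) (List.drop P s.toList))
        = List.take (s.toList.length - P) (List.drop P s.toList) := by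
    intro s hs
    split_ifs with h
    · have hlen0 : s.toList.length = 0 := by omega
      rw [List.eq_nil_of_length_eq_zero hlen0]
      simp
    · rw [Nat.sub_zero]
  simp only [List.map_map, Function.comp_def]
  rw [List.map_congr_left hdiffsA]
  intro heq
  apply_fun (fun s => s.toList.length) at heq
  simp only [String.toList_ofList, List.length_append, List.length_cons, List.length_take,
    List.length_reverse, length_intercalate_comma, List.map_map, List.take_zero,
    List.reverse_nil, List.length_nil, Function.comp_def] at heq
  have hmemlen : ∀ s ∈ str0 :: rest, n ≤ s.toList.length := by
    intro s hs
    rcases List.mem_cons.mp hs with rfl | hs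
    · exact hn0
    · exact hns s hs
  have hm : min CS (n - P) = n - P := by omega
  rw [List.length_map, List.length_map] at heq
  have hE : ((str0 :: rest).map
        (fun x => min (x.toList.length - P) (List.drop P x.toList).length)).sum
      = ((str0 :: rest).map (fun s => s.toList.length - P)).sum := by
    refine congrArg List.sum (List.map_congr_left ?_)
    intro s hs
    simp [List.length_drop]
  have hC : ((str0 :: rest).map
        (fun x => min (x.toList.length - min CS (n - P) - P) (List.drop P x.toList).length)).sum
      = ((str0 :: rest).map (fun s => s.toList.length - (n - P) - P)).sum := by
    refine congrArg List.sum (List.map_congr_left ?_)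
    intro s hs
    have := hmemlen s hs
    simp only [List.length_drop, hm]
    omega
  rw [hE, hC] at heq
  have hsum := sum_shift (str0 :: rest) (fun s => s.toList.length - P)
    (fun s => s.toList.length - (n - P) - P) (n - P)
    (fun s hs => by
      have := hmemlen s hs
      show s.toList.length - P = (s.toList.length - (n - P) - P) + (n - P)
      omega)
  have hk : 2 ≤ (str0 :: rest).length := by
    cases rest with
    | nil => exact absurd rfl hr
    | cons a l => simp
  have ht : 2 * (n - P) ≤ (str0 :: rest).length * (n - P) :=
    Nat.mul_le_mul_right _ hk
  omega

-- ===== VERDICT (by name: the statement is the Claim_ definition above) =====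
theorem shell_compress_spec : Claim_unchanged_shell_compress := by
  intro strs _ hpre hnd
  match strs with
  | [] => exact absurd rfl hpre
  | str0 :: rest =>
    by_cases hr : rest = []
    · subst hr; rfl
    · exact main_eq str0 rest hr hnd

theorem shell_compress_changed : Claim_changed_shell_compress := by
  unfold Claim_changed_shell_compress; decide

theorem shell_compress_tight : Claim_exact_shell_compress := by
  intro strs _ hpre hd
  match strs with
  | [] => exact absurd rfl hpre
  | str0 :: rest =>
    by_cases hr : rest = []
    · subst hr
      exact absurd hd (by simp [D_shell_compress])
    · exact main_neq str0 rest hr hd
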